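-- pv_equiv track=rewrite | github.com/7Gus7/Image_to_Ascii | img_to_asc.py | scale_matrix
-- ===== SOURCE A (Python) =====
-- def scale_matrix(matrix, new_width, new_height):
--     # Helper function for scaling, called from write_img
--     result = []
--     for y in range(new_height): # Iterating through each (now scaled) height level
--         # We are going to find a source pixel (x, y) to map into our new scaled image
--         src_y = int(y * len(matrix) / new_height) # y/new_height = src_y/original height => src_y = y * original height/new_height
--         row = []
--         for x in range(new_width): # Iterating through each (now scaled) row position
--             src_x = int(x * len(matrix[0]) / new_width) # x/new_width = src_x/original width => src_x = x * original width/new_width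
--             row.append(matrix[src_y][src_x])
--         result.append(row)
--     return result
-- ===== SOURCE B (Python) =====
-- def scale_matrix(matrix, new_width, new_height):
--     # Run-length construction: walk the SOURCE once, replicating each source row /
--     # element by its output multiplicity (a telescoping ceil-division count),
--     # instead of mapping every output cell back to a source index.
--     if new_height <= 0:
--         return []
--     if not matrix:
--         return [[] for _ in range(new_height)]
--     h = len(matrix)
--     w = len(matrix[0]) if new_width > 0 else 0
--     result = []
--     for i in range(h):
--         src = matrix[i]
--         rep = ((i + 1) * new_height + h - 1) // h - (i * new_height + h - 1) // h
--         if rep <= 0: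
--             continue
--         row = []
--         for j in range(w):
--             crep = ((j + 1) * new_width + w - 1) // w - (j * new_width + w - 1) // w
--             if crep > 0:
--                 row.extend([src[j]] * crep)
--         result.extend([row] * rep)
--     return result
-- ===== Notes on version B (the rewrite author's own statement) =====
-- stated objective: alternative
-- what changed: B walks the SOURCE matrix once and builds the output by run-length replication (each source row and element repeated by its telescoping ceil-division multiplicity), instead of A's per-output-cell backward index int(y*len/new) computed for every cell.
import Mathlib
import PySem

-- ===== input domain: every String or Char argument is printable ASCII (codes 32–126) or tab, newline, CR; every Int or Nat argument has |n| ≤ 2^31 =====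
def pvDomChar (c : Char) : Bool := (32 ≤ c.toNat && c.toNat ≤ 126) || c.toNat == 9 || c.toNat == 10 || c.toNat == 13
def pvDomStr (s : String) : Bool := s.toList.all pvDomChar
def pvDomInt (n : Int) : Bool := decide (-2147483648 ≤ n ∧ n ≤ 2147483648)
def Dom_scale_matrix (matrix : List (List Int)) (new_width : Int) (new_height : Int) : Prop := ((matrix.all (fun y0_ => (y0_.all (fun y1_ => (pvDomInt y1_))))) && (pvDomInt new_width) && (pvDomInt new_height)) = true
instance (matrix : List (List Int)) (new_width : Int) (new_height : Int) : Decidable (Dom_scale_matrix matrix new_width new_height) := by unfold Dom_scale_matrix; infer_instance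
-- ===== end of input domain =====

-- B builds the output by run-length replication (each SOURCE row/element repeated by a telescoping ceil-division count) instead of A's per-output-cell index mapping; alternative algorithm, same output.


-- ===== PORT A =====
-- int(a/b) with a ≥ 0, b > 0 is ported as floor division (exact on these nonnegative operands)
def scale_matrix (matrix : List (List Int)) (new_width : Int) (new_height : Int) : List (List Int) :=
  (PySem.List.pyRange 0 new_height 1).foldl (fun result y =>
    let src_y := PySem.Int.floordiv (y * (matrix.length : Int)) new_height
    let row := (PySem.List.pyRange 0 new_width 1).foldl (fun row x =>
      let src_x := PySem.Int.floordiv (x * (((PySem.List.pyGet? matrix 0).getD []).length : Int)) new_width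
      row ++ [(PySem.List.pyGet? ((PySem.List.pyGet? matrix src_y).getD []) src_x).getD 0]) []
    result ++ [row]) []

-- ===== PORT B =====
-- run-length construction: each source row/element is replicated by its output multiplicity
def scale_matrix_alt (matrix : List (List Int)) (new_width : Int) (new_height : Int) : List (List Int) :=
  if new_height ≤ 0 then []
  else if matrix = [] then (PySem.List.pyRange 0 new_height 1).map (fun _ => ([] : List Int))
  else
    let h : Int := matrix.length
    let w : Int := if 0 < new_width then (((PySem.List.pyGet? matrix 0).getD []).length : Int) else 0
    (PySem.List.pyRange 0 h 1).foldl (fun result i =>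
      let src := (PySem.List.pyGet? matrix i).getD []
      let rep := PySem.Int.floordiv ((i + 1) * new_height + h - 1) h - PySem.Int.floordiv (i * new_height + h - 1) h
      if rep ≤ 0 then result
      else
        let row := (PySem.List.pyRange 0 w 1).foldl (fun row j =>
          let crep := PySem.Int.floordiv ((j + 1) * new_width + w - 1) w - PySem.Int.floordiv (j * new_width + w - 1) w
          if 0 < crep then row ++ List.replicate crep.toNat ((PySem.List.pyGet? src j).getD 0) else row) []
        result ++ List.replicate rep.toNat row) []

-- ===== PRECONDITION & SPEC =====
-- Pre_ excludes exactly the inputs where the Python A raises IndexError (or, for B's divisions,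
-- where A raises): new_width > 0 and new_height > 0 together with an empty matrix, an empty first
-- row, or some replicated (selected) source row shorter than the largest selected column index.
def Pre_scale_matrix (matrix : List (List Int)) (new_width : Int) (new_height : Int) : Prop :=
  new_height ≤ 0 ∨ new_width ≤ 0 ∨
    (matrix ≠ [] ∧ 0 < ((PySem.List.pyGet? matrix 0).getD []).length ∧
      ∀ i ∈ List.range matrix.length,
        0 < PySem.Int.floordiv (((i : Int) + 1) * new_height + (matrix.length : Int) - 1) (matrix.length : Int)
            - PySem.Int.floordiv ((i : Int) * new_height + (matrix.length : Int) - 1) (matrix.length : Int) →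
        PySem.Int.floordiv ((new_width - 1) * (((PySem.List.pyGet? matrix 0).getD []).length : Int)) new_width
          < ((matrix.getD i []).length : Int))
instance (matrix : List (List Int)) (new_width : Int) (new_height : Int) : Decidable (Pre_scale_matrix matrix new_width new_height) := by unfold Pre_scale_matrix; infer_instance

def pvWitness_scale_matrix : List (List Int) × Int × Int := ([[1, 2], [3, 4]], 3, 2)

def Spec_scale_matrix (matrix : List (List Int)) (new_width : Int) (new_height : Int) (out : List (List Int)) : Prop := out = scale_matrix_alt matrix new_width new_height
instance (matrix : List (List Int)) (new_width : Int) (new_height : Int) (out : List (List Int)) : Decidable (Spec_scale_matrix matrix new_width new_height out) := by unfold Spec_scale_matrix; infer_instance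

-- ===== CLAIM (what is proved, stated in full; the proofs are below) =====
def Claim_equal_scale_matrix : Prop := ∀ (matrix : List (List Int)) (new_width : Int) (new_height : Int), Dom_scale_matrix matrix new_width new_height → Pre_scale_matrix matrix new_width new_height → Spec_scale_matrix matrix new_width new_height (scale_matrix matrix new_width new_height)


-- ===== LEMMAS AND PROOFS =====

-- ceil(i*n/m) in Nat arithmetic: the number of outputs among 0..? — c i counts outputs below group i
def pvCeil (i n m : ℕ) : ℕ := (i * n + (m - 1)) / m

theorem pvCeil_mono (i n m : ℕ) : pvCeil i n m ≤ pvCeil (i + 1) n m := by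
  apply Nat.div_le_div_right; nlinarith

theorem pvCeil_le (i k n m : ℕ) (h : i ≤ k) : pvCeil i n m ≤ pvCeil k n m := by
  apply Nat.div_le_div_right; nlinarith

theorem pvCeil_zero (n m : ℕ) (hm : 0 < m) : pvCeil 0 n m = 0 := by
  simp [pvCeil, Nat.div_eq_of_lt (by omega : m - 1 < m)]

theorem pvCeil_top (n m : ℕ) (hm : 0 < m) : pvCeil m n m = n := by
  unfold pvCeil
  rw [Nat.mul_add_div hm, Nat.div_eq_of_lt (by omega)]; omega

theorem pvSel_eq (k y n m : ℕ) (hm : 0 < m)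
    (h1 : pvCeil k n m ≤ y) (h2 : y < pvCeil (k + 1) n m) : y * m / n = k := by
  unfold pvCeil at h1 h2
  obtain ⟨m', rfl⟩ : ∃ m', m = m' + 1 := ⟨m - 1, by omega⟩
  have a1 : k * n ≤ y * (m' + 1) := by
    have := (Nat.div_le_iff_le_mul_add_pred hm).mp h1
    nlinarith
  have a2 : y * (m' + 1) < (k + 1) * n := by
    have h3 : (y + 1) * (m' + 1) ≤ (k + 1) * n + (m' + 1 - 1) := (Nat.le_div_iff_mul_le hm).mp h2
    simp only [Nat.add_sub_cancel] at h3
    nlinarith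
  exact Nat.div_eq_of_lt_le a1 a2

-- run-length characterisation of the nearest-neighbour index map:
-- mapping y ↦ g (y*m/n) over range n equals replicating each g i by its multiplicity
theorem run_aux {α : Type} (g : ℕ → α) (n m : ℕ) (hm : 0 < m) :
    ∀ d k, k + d = m →
      (List.range' (pvCeil k n m) (pvCeil m n m - pvCeil k n m)).map (fun y => g (y * m / n)) =
      (List.range' k d).flatMap (fun i => List.replicate (pvCeil (i + 1) n m - pvCeil i n m) (g i)) := by
  intro d
  induction d with
  | zero =>
    intro k hk
    subst hk
    simp
  | succ d ih =>
    intro k hk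
    have hk1 : k + 1 + d = m := by omega
    have m1 : pvCeil k n m ≤ pvCeil (k + 1) n m := pvCeil_mono k n m
    have m2 : pvCeil (k + 1) n m ≤ pvCeil m n m := pvCeil_le _ _ _ _ (by omega)
    have hsplit : List.range' (pvCeil k n m) (pvCeil m n m - pvCeil k n m) =
        List.range' (pvCeil k n m) (pvCeil (k + 1) n m - pvCeil k n m) ++
        List.range' (pvCeil (k + 1) n m) (pvCeil m n m - pvCeil (k + 1) n m) := by
      have := List.range'_append (s := pvCeil k n m) (m := pvCeil (k + 1) n m - pvCeil k n m)
        (n := pvCeil m n m - pvCeil (k + 1) n m) (step := 1)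
      rw [show pvCeil k n m + 1 * (pvCeil (k + 1) n m - pvCeil k n m) = pvCeil (k + 1) n m by omega] at this
      rw [show (pvCeil (k + 1) n m - pvCeil k n m) + (pvCeil m n m - pvCeil (k + 1) n m) = pvCeil m n m - pvCeil k n m by omega] at this
      exact this.symm
    rw [hsplit, List.map_append]
    have hfirst : (List.range' (pvCeil k n m) (pvCeil (k + 1) n m - pvCeil k n m)).map (fun y => g (y * m / n)) =
        List.replicate (pvCeil (k + 1) n m - pvCeil k n m) (g k) := by
      rw [List.map_congr_left (g := fun _ => g k) ?_]
      · rw [List.map_const', List.length_range']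
      · intro y hy
        rw [List.mem_range'_1] at hy
        exact congrArg g (pvSel_eq k y n m hm hy.1 (by omega))
    rw [hfirst, List.range'_succ, List.flatMap_cons, ih (k + 1) hk1]

theorem run_length {α : Type} (g : ℕ → α) (n m : ℕ) (_hn : 0 < n) (hm : 0 < m) :
    (List.range n).map (fun y => g (y * m / n)) =
    (List.range m).flatMap (fun i => List.replicate (pvCeil (i + 1) n m - pvCeil i n m) (g i)) := by
  have := run_aux g n m hm m 0 (by omega)
  rw [pvCeil_zero n m hm, pvCeil_top n m hm] at this
  simpa [List.range_eq_range'] using this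

-- generic loop shapes of B's two accumulating loops
theorem foldl_skip_append {α β : Type} (p : α → Prop) [DecidablePred p] (g : α → List β) (l : List α) (acc : List β) :
    l.foldl (fun r x => if p x then r else r ++ g x) acc = acc ++ l.flatMap (fun x => if p x then [] else g x) := by
  induction l generalizing acc with
  | nil => simp
  | cons a t ih => by_cases h : p a <;> simp [List.foldl, h, ih]

theorem foldl_append_pos {α β : Type} (p : α → Prop) [DecidablePred p] (g : α → List β) (l : List α) (acc : List β) :
    l.foldl (fun r x => if p x then r ++ g x else r) acc = acc ++ l.flatMap (fun x => if p x then g x else []) := by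
  induction l generalizing acc with
  | nil => simp
  | cons a t ih => by_cases h : p a <;> simp [List.foldl, h, ih]

-- the ceil expression of the ports, in Nat form
theorem ceil_cast (j n m : ℕ) (hm : 0 < m) :
    PySem.Int.floordiv (((j : Int)) * (n : Int) + (m : Int) - 1) (m : Int) = ((pvCeil j n m : ℕ) : Int) := by
  have h1 : ((j : Int)) * (n : Int) + (m : Int) - 1 = ((j * n + (m - 1) : ℕ) : Int) := by
    push_cast [Nat.cast_sub (by omega : 1 ≤ m)]
    ring
  rw [h1, PySem.Int.floordiv_natCast]
  rfl

-- A's result as a nested map (citing the library foldl shape)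
theorem A_norm (matrix : List (List Int)) (new_width new_height : Int) :
    scale_matrix matrix new_width new_height =
      (PySem.List.pyRange 0 new_height 1).map (fun y =>
        (PySem.List.pyRange 0 new_width 1).map (fun x =>
          (PySem.List.pyGet?
            ((PySem.List.pyGet? matrix (PySem.Int.floordiv (y * (matrix.length : Int)) new_height)).getD [])
            (PySem.Int.floordiv (x * (((PySem.List.pyGet? matrix 0).getD []).length : Int)) new_width)).getD 0)) := by
  unfold scale_matrix
  simp only [PySem.List.foldl_append_singleton_eq_map, List.nil_append]


-- floordiv on nonnegative casts
theorem fdiv_cast (a b c : ℕ) : PySem.Int.floordiv ((a : Int) * (b : Int)) (c : Int) = ((a * b / c : ℕ) : Int) := by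
  rw [show ((a : Int) * (b : Int)) = ((a * b : ℕ) : Int) by push_cast; ring, PySem.Int.floordiv_natCast]

theorem ceil_cast' (j n m : ℕ) (hm : 0 < m) :
    PySem.Int.floordiv (((j : Int) + 1) * (n : Int) + (m : Int) - 1) (m : Int) = ((pvCeil (j + 1) n m : ℕ) : Int) := by
  rw [show ((j : Int) + 1) = ((j + 1 : ℕ) : Int) by push_cast; ring]
  exact ceil_cast (j + 1) n m hm

-- common normal form both ports are reduced to (positive sizes, nonempty matrix)
def pvNF (matrix : List (List Int)) (M N : ℕ) : List (List Int) :=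
  (List.range matrix.length).flatMap (fun i =>
    List.replicate (pvCeil (i + 1) N matrix.length - pvCeil i N matrix.length)
      ((List.range ((PySem.List.pyGet? matrix 0).getD []).length).flatMap (fun j =>
        List.replicate (pvCeil (j + 1) M ((PySem.List.pyGet? matrix 0).getD []).length - pvCeil j M ((PySem.List.pyGet? matrix 0).getD []).length)
          ((PySem.List.pyGet? ((PySem.List.pyGet? matrix (i : Int)).getD []) (j : Int)).getD 0))))

theorem A_nonpos (matrix : List (List Int)) (nw : Int) (N : ℕ) (hnw : nw ≤ 0) :
    scale_matrix matrix nw (N : Int) = List.replicate N ([] : List Int) := by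
  have h0 : PySem.List.pyRange 0 nw 1 = [] := by simp [PySem.List.pyRange]; omega
  rw [A_norm, PySem.List.pyRange_zero_natCast]
  simp [h0, Function.comp_def, List.map_const']

theorem A_pos (matrix : List (List Int)) (M N : ℕ) (hM : 0 < M) (hN : 0 < N)
    (hmat : matrix ≠ []) (hW : 0 < ((PySem.List.pyGet? matrix 0).getD []).length) :
    scale_matrix matrix (M : Int) (N : Int) = pvNF matrix M N := by
  have hH : 0 < matrix.length := List.length_pos_of_ne_nil hmat
  rw [A_norm]
  have step1 : (PySem.List.pyRange 0 (N : Int) 1).map (fun y =>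
        (PySem.List.pyRange 0 (M : Int) 1).map (fun x =>
          (PySem.List.pyGet?
            ((PySem.List.pyGet? matrix (PySem.Int.floordiv (y * (matrix.length : Int)) (N : Int))).getD [])
            (PySem.Int.floordiv (x * (((PySem.List.pyGet? matrix 0).getD []).length : Int)) (M : Int))).getD 0)) =
      (List.range N).map (fun y : ℕ =>
        (List.range M).map (fun x : ℕ =>
          (PySem.List.pyGet?
            ((PySem.List.pyGet? matrix ((y * matrix.length / N : ℕ) : Int)).getD [])
            ((x * ((PySem.List.pyGet? matrix 0).getD []).length / M : ℕ) : Int)).getD 0)) := by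
    simp only [PySem.List.pyRange_zero_natCast, List.map_map]
    apply List.map_congr_left
    intro y _
    simp only [Function.comp_apply, fdiv_cast]
    apply List.map_congr_left
    intro x _
    simp only [Function.comp_apply, fdiv_cast]
  rw [step1]
  rw [run_length (fun i : ℕ =>
        (List.range M).map (fun x : ℕ =>
          (PySem.List.pyGet? ((PySem.List.pyGet? matrix (i : Int)).getD [])
            ((x * ((PySem.List.pyGet? matrix 0).getD []).length / M : ℕ) : Int)).getD 0)) N matrix.length hN hH]
  unfold pvNF
  apply List.flatMap_congr
  intro i _
  congr 1
  rw [run_length (fun j : ℕ =>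
        (PySem.List.pyGet? ((PySem.List.pyGet? matrix (i : Int)).getD []) (j : Int)).getD 0)
      M ((PySem.List.pyGet? matrix 0).getD []).length hM hW]

theorem inner_pos (src : List Int) (M W : ℕ) (_hM : 0 < M) (hW : 0 < W) :
    (PySem.List.pyRange 0 (W : Int) 1).foldl (fun row j =>
      if 0 < PySem.Int.floordiv ((j + 1) * (M : Int) + (W : Int) - 1) (W : Int) - PySem.Int.floordiv (j * (M : Int) + (W : Int) - 1) (W : Int)
      then row ++ List.replicate (PySem.Int.floordiv ((j + 1) * (M : Int) + (W : Int) - 1) (W : Int) - PySem.Int.floordiv (j * (M : Int) + (W : Int) - 1) (W : Int)).toNat ((PySem.List.pyGet? src j).getD 0)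
      else row) []
    = (List.range W).flatMap (fun j : ℕ => List.replicate (pvCeil (j + 1) M W - pvCeil j M W) ((PySem.List.pyGet? src (j : Int)).getD 0)) := by
  rw [PySem.List.pyRange_zero_natCast, List.foldl_map]
  rw [foldl_append_pos]
  rw [List.nil_append]
  apply List.flatMap_congr
  intro j _
  simp only [ceil_cast' j M W hW, ceil_cast j M W hW]
  have hba : pvCeil j M W ≤ pvCeil (j + 1) M W := pvCeil_mono j M W
  by_cases hlt : (0 : Int) < ((pvCeil (j + 1) M W : ℕ) : Int) - ((pvCeil j M W : ℕ) : Int)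
  · rw [if_pos hlt, Int.toNat_sub]
  · rw [if_neg hlt]
    have h0 : pvCeil (j + 1) M W - pvCeil j M W = 0 := by omega
    rw [h0]
    rfl

theorem B_pos (matrix : List (List Int)) (M N : ℕ) (hM : 0 < M) (hN : 0 < N)
    (hmat : matrix ≠ []) (hW : 0 < ((PySem.List.pyGet? matrix 0).getD []).length) :
    scale_matrix_alt matrix (M : Int) (N : Int) = pvNF matrix M N := by
  have hH : 0 < matrix.length := List.length_pos_of_ne_nil hmat
  have hg1 : ¬ ((N : Int) ≤ 0) := by omega
  have hg2 : (0 : Int) < (M : Int) := by omega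
  simp only [scale_matrix_alt, if_neg hg1, if_neg hmat, if_pos hg2]
  rw [show PySem.List.pyRange 0 (matrix.length : Int) 1 = List.map (fun k : ℕ => (k : Int)) (List.range matrix.length) from PySem.List.pyRange_zero_natCast matrix.length]
  rw [List.foldl_map]
  rw [foldl_skip_append]
  rw [List.nil_append]
  unfold pvNF
  apply List.flatMap_congr
  intro i _
  simp only [ceil_cast' i N matrix.length hH, ceil_cast i N matrix.length hH]
  have hba : pvCeil i N matrix.length ≤ pvCeil (i + 1) N matrix.length := pvCeil_mono i N matrix.length
  by_cases hle : ((pvCeil (i + 1) N matrix.length : ℕ) : Int) - ((pvCeil i N matrix.length : ℕ) : Int) ≤ 0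
  · rw [if_pos hle]
    have h0 : pvCeil (i + 1) N matrix.length - pvCeil i N matrix.length = 0 := by omega
    rw [h0]
    rfl
  · rw [if_neg hle, Int.toNat_sub]
    rw [inner_pos ((PySem.List.pyGet? matrix (i : Int)).getD []) M ((PySem.List.pyGet? matrix 0).getD []).length hM hW]

theorem B_nonpos (matrix : List (List Int)) (nw : Int) (N : ℕ) (hN : 0 < N) (hnw : nw ≤ 0)
    (hmat : matrix ≠ []) :
    scale_matrix_alt matrix nw (N : Int) = List.replicate N ([] : List Int) := by
  have hH : 0 < matrix.length := List.length_pos_of_ne_nil hmat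
  have hg1 : ¬ ((N : Int) ≤ 0) := by omega
  have hg2 : ¬ ((0 : Int) < nw) := by omega
  simp only [scale_matrix_alt, if_neg hg1, if_neg hmat, if_neg hg2]
  have hr0 : PySem.List.pyRange 0 (0 : Int) 1 = [] := rfl
  rw [hr0]
  simp only [List.foldl_nil]
  rw [show PySem.List.pyRange 0 (matrix.length : Int) 1 = List.map (fun k : ℕ => (k : Int)) (List.range matrix.length) from PySem.List.pyRange_zero_natCast matrix.length]
  rw [List.foldl_map]
  rw [foldl_skip_append]
  rw [List.nil_append]
  have hrep : List.replicate N ([] : List Int) =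
      (List.range matrix.length).flatMap (fun i =>
        List.replicate (pvCeil (i + 1) N matrix.length - pvCeil i N matrix.length) ([] : List Int)) := by
    rw [← run_length (fun _ : ℕ => ([] : List Int)) N matrix.length hN hH]
    rw [List.map_const', List.length_range]
  rw [hrep]
  apply List.flatMap_congr
  intro i _
  simp only [ceil_cast' i N matrix.length hH, ceil_cast i N matrix.length hH]
  have hba : pvCeil i N matrix.length ≤ pvCeil (i + 1) N matrix.length := pvCeil_mono i N matrix.length
  by_cases hle : ((pvCeil (i + 1) N matrix.length : ℕ) : Int) - ((pvCeil i N matrix.length : ℕ) : Int) ≤ 0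
  · rw [if_pos hle]
    have h0 : pvCeil (i + 1) N matrix.length - pvCeil i N matrix.length = 0 := by omega
    rw [h0]
    rfl
  · rw [if_neg hle, Int.toNat_sub]

-- ===== VERDICT (by name: the statement is the Claim_ definition above) =====
theorem scale_matrix_spec : Claim_equal_scale_matrix := by
  intro matrix nw nh _ hpre
  unfold Spec_scale_matrix
  by_cases hnh : nh ≤ 0
  · have hA : PySem.List.pyRange 0 nh 1 = [] := by simp [PySem.List.pyRange]; omega
    rw [A_norm]
    simp [scale_matrix_alt, hnh, hA]
  · rw [not_le] at hnh
    obtain ⟨N, rfl⟩ : ∃ N : ℕ, nh = (N : Int) := ⟨nh.toNat, (Int.toNat_of_nonneg (by omega)).symm⟩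
    have hN : 0 < N := by exact_mod_cast hnh
    by_cases hnw : 0 < nw
    · obtain ⟨M, rfl⟩ : ∃ M : ℕ, nw = (M : Int) := ⟨nw.toNat, (Int.toNat_of_nonneg (by omega)).symm⟩
      have hM : 0 < M := by exact_mod_cast hnw
      rcases hpre with h | h | h
      · omega
      · omega
      · obtain ⟨hmat, hW, -⟩ := h
        rw [A_pos matrix M N hM hN hmat hW, B_pos matrix M N hM hN hmat hW]
    · rw [not_lt] at hnw
      by_cases hmat : matrix = []
      · subst hmat
        rw [A_nonpos _ _ _ hnw]
        simp [scale_matrix_alt, PySem.List.pyRange_zero_natCast, List.map_map,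
          Function.comp_def, List.map_const', hN.ne']
      · rw [A_nonpos _ _ _ hnw, B_nonpos matrix nw N hN hnw hmat]
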